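-- pv_equiv track=rewrite | github.com/NicoMarimon/IpsCalculator | funciones.py | calcular_host
-- ===== SOURCE A (Python) =====
-- def reverse_list (list):
--     # Esta función devuelve una lista dada la vuelta
--     return list[::-1]
--
-- def calcular_host(ip,mask, num):
--     # Esta función calcula la primera o la última IP de Host, si quieres calcular la primera, has de igualar el argumento num a 1, si quieres calcular la última, lo has de igualar a 1.
--     if num == 0:
--         last_num = 1
--     else:
--         last_num = 0
--
--     reversed_ip = []
--
--     for list in reverse_list(ip):
--         reversed_ip.append(reverse_list(list))
--
--     num_bit = 32
--
--     for x in range(len(ip)):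
--         for y in range(len(reversed_ip[x])):
--             if num_bit == mask:
--                 break
--             else:
--                 if num_bit == 32:
--                     reversed_ip[x][y] = last_num
--                 else:
--                     reversed_ip[x][y] = num
--                 num_bit -= 1
--
--     ip = []
--     for list in reverse_list(reversed_ip):
--         ip.append(reverse_list(list))
--
--     return ip
-- ===== SOURCE B (Python) =====
-- def calcular_host(ip, mask, num):
--     # Single backward pass over the flattened bits (no reversals); re-chunk at the end.
--     last_num = 1 if num == 0 else 0
--     lens = [len(row) for row in ip]
--     flat = [b for row in ip for b in row]
--     n = len(flat)
--     out = flat[:]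
--     k = 0
--     while k < n and 32 - k != mask:
--         out[n - 1 - k] = last_num if k == 0 else num
--         k += 1
--     res = []
--     i = 0
--     for L in lens:
--         res.append(out[i:i + L])
--         i += L
--     return res
-- ===== Notes on version B (the rewrite author's own statement) =====
-- stated objective: alternative
-- what changed: Replaces the four element-wise reversals and the nested x,y loop over reversed octets by one flatten, a single backward while-pass over the flat bit list, and a re-chunk by recorded octet lengths.
import Mathlib
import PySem

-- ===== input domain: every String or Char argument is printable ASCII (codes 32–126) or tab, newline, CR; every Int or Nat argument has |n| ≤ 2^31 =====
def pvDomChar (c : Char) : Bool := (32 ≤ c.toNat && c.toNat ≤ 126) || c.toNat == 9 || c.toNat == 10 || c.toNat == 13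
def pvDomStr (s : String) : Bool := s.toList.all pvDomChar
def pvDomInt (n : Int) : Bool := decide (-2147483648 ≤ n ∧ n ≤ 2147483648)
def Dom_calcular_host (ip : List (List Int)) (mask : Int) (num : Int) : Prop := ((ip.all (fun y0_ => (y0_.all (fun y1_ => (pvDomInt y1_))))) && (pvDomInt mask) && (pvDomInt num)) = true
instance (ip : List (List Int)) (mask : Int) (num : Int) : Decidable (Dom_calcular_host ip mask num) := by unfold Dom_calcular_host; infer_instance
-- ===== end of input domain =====

-- B flattens the octets, does one backward pass over the flat bit list, and re-chunks;
-- same return value as A on all inputs (A is total and does not mutate its arguments).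

-- ===== PORT A =====
-- reverse_list(list) = list[::-1]
def reverse_list {α : Type} (l : List α) : List α :=
  (PySem.List.slice? l none none (-1)).getD []

-- inner 'for y in range(len(reversed_ip[x]))' loop with its break, mutating the row by index
def pvInnerA (ys : List Nat) (row : List Int) (numBit mask num lastNum : Int) :
    List Int × Int :=
  match ys with
  | [] => (row, numBit)
  | y :: rest =>
    if numBit = mask then (row, numBit)            -- break
    else
      pvInnerA rest (row.set y (if numBit = 32 then lastNum else num)) (numBit - 1)
        mask num lastNum

-- outer 'for x in range(len(ip))' loop, mutating reversed_ip[x] and threading num_bit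
def pvOuterA (xs : List Nat) (rip : List (List Int)) (numBit mask num lastNum : Int) :
    List (List Int) × Int :=
  match xs with
  | [] => (rip, numBit)
  | x :: rest =>
    let row := rip.getD x []                        -- reversed_ip[x] (x is in range in A)
    let p := pvInnerA (List.range row.length) row numBit mask num lastNum
    pvOuterA rest (rip.set x p.1) p.2 mask num lastNum

def calcular_host (ip : List (List Int)) (mask : Int) (num : Int) : List (List Int) :=
  let lastNum : Int := if num = 0 then 1 else 0
  let reversedIp :=
    (reverse_list ip).foldl (fun acc l => acc ++ [reverse_list l]) []
  let p := pvOuterA (List.range ip.length) reversedIp 32 mask num lastNum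
  (reverse_list p.1).foldl (fun acc l => acc ++ [reverse_list l]) []

-- ===== PORT B =====
-- the 'while k < n and 32 - k != mask' backward pass, assigning out[n-1-k]
def pvBGo (out : List Int) (n k : Nat) (mask num lastNum : Int) : List Int :=
  if k < n ∧ (32 - (k : Int)) ≠ mask then
    pvBGo (out.set (n - 1 - k) (if k = 0 then lastNum else num)) n (k + 1)
      mask num lastNum
  else out
termination_by n - k

-- 'res.append(out[i:i+L]); i += L' — slicing consecutive blocks = take/drop of the remainder
def pvChunk : List Nat → List Int → List (List Int)
  | [], _ => []
  | L :: rest, out => out.take L :: pvChunk rest (out.drop L)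

def calcular_host_alt (ip : List (List Int)) (mask : Int) (num : Int) : List (List Int) :=
  let lastNum : Int := if num = 0 then 1 else 0
  let lens := ip.map List.length
  let flat := ip.flatMap id
  pvChunk lens (pvBGo flat flat.length 0 mask num lastNum)

-- ===== PRECONDITION & SPEC =====
def Spec_calcular_host (ip : List (List Int)) (mask : Int) (num : Int) (out : List (List Int)) : Prop := out = calcular_host_alt ip mask num
instance (ip : List (List Int)) (mask : Int) (num : Int) (out : List (List Int)) : Decidable (Spec_calcular_host ip mask num out) := by unfold Spec_calcular_host; infer_instance

-- ===== CLAIM (what is proved, stated in full; the proofs are below) =====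
def Claim_equal_calcular_host : Prop := ∀ (ip : List (List Int)) (mask : Int) (num : Int), Dom_calcular_host ip mask num → Spec_calcular_host ip mask num (calcular_host ip mask num)

-- ===== LEMMAS AND PROOFS =====

-- pure functional model of A's mutation: processes a list from the front,
-- returning the new list and the final num_bit
def mutRow (row : List Int) (nb mask num lastNum : Int) : List Int × Int :=
  match row with
  | [] => ([], nb)
  | a :: rest =>
    if nb = mask then (a :: rest, nb)
    else
      let p := mutRow rest (nb - 1) mask num lastNum
      ((if nb = 32 then lastNum else num) :: p.1, p.2)

def mutRows (l : List (List Int)) (nb mask num lastNum : Int) :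
    List (List Int) × Int :=
  match l with
  | [] => ([], nb)
  | r :: rest =>
    let p := mutRow r nb mask num lastNum
    let q := mutRows rest p.2 mask num lastNum
    (p.1 :: q.1, q.2)

theorem reverse_list_eq {α : Type} (l : List α) : reverse_list l = l.reverse := by
  simp [reverse_list, PySem.List.slice?_none_none_neg_one]

theorem foldl_append_map {α β : Type} (f : α → β) (l : List α) (acc : List β) :
    l.foldl (fun acc x => acc ++ [f x]) acc = acc ++ l.map f := by
  induction l generalizing acc with
  | nil => simp
  | cons a l ih => simp [List.foldl, ih, List.append_assoc]

theorem mutRow_stop (s : List Int) (mask num lastNum : Int) :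
    mutRow s mask mask num lastNum = (s, mask) := by
  cases s <;> simp [mutRow]

theorem mutRow_append (r s : List Int) (nb mask num lastNum : Int) :
    mutRow (r ++ s) nb mask num lastNum =
      ((mutRow r nb mask num lastNum).1 ++
        (mutRow s (mutRow r nb mask num lastNum).2 mask num lastNum).1,
       (mutRow s (mutRow r nb mask num lastNum).2 mask num lastNum).2) := by
  induction r generalizing nb with
  | nil => simp [mutRow]
  | cons a r ih =>
    by_cases h : nb = mask
    · subst h; simp [mutRow, mutRow_stop]
    · simp [mutRow, h, ih]

theorem mutRow_length (r : List Int) (nb mask num lastNum : Int) :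
    (mutRow r nb mask num lastNum).1.length = r.length := by
  induction r generalizing nb with
  | nil => simp [mutRow]
  | cons a r ih =>
    by_cases h : nb = mask <;> simp [mutRow, h, ih]

theorem mutRows_flatten (l : List (List Int)) (nb mask num lastNum : Int) :
    (mutRows l nb mask num lastNum).1.flatten =
      (mutRow l.flatten nb mask num lastNum).1 ∧
    (mutRows l nb mask num lastNum).2 =
      (mutRow l.flatten nb mask num lastNum).2 := by
  induction l generalizing nb with
  | nil => simp [mutRows, mutRow]
  | cons r rest ih =>
    have h := mutRow_append r rest.flatten nb mask num lastNum
    simp [mutRows, List.flatten, h, (ih _).1, (ih _).2]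

theorem mutRows_lengths (l : List (List Int)) (nb mask num lastNum : Int) :
    (mutRows l nb mask num lastNum).1.map List.length = l.map List.length := by
  induction l generalizing nb with
  | nil => simp [mutRows]
  | cons r rest ih => simp [mutRows, mutRow_length, ih]

-- set at the boundary of an append
theorem set_append_len {α : Type} (pre : List α) (a v : α) (s : List α) :
    (pre ++ a :: s).set pre.length v = pre ++ v :: s := by
  induction pre with
  | nil => simp
  | cons b pre ih => simp

theorem getD_append_len (pre : List (List Int)) (r : List Int) (s : List (List Int)) :
    (pre ++ r :: s).getD pre.length [] = r := by
  induction pre with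
  | nil => simp
  | cons b pre ih => simp

-- A's inner loop computes mutRow
theorem pvInnerA_eq (suf pre : List Int) (nb mask num lastNum : Int) :
    pvInnerA (List.range' pre.length suf.length) (pre ++ suf) nb mask num lastNum =
      (pre ++ (mutRow suf nb mask num lastNum).1,
       (mutRow suf nb mask num lastNum).2) := by
  induction suf generalizing pre nb with
  | nil => simp [pvInnerA, mutRow]
  | cons a s ih =>
    by_cases h : nb = mask
    · subst h; simp [List.range', pvInnerA, mutRow]
    · have hset := set_append_len pre a (if nb = 32 then lastNum else num) s
      have := ih (pre ++ [if nb = 32 then lastNum else num]) (nb - 1)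
      simp only [List.length_append, List.length_cons, List.length_nil] at this
      simp only [List.length_cons]
      rw [List.range'_succ]
      simp only [pvInnerA, h, if_false, hset, mutRow]
      simpa [List.append_assoc] using this

-- A's outer loop computes mutRows
theorem pvOuterA_eq (suf pre : List (List Int)) (nb mask num lastNum : Int) :
    pvOuterA (List.range' pre.length suf.length) (pre ++ suf) nb mask num lastNum =
      (pre ++ (mutRows suf nb mask num lastNum).1,
       (mutRows suf nb mask num lastNum).2) := by
  induction suf generalizing pre nb with
  | nil => simp [pvOuterA, mutRows]
  | cons r s ih =>
    have hget := getD_append_len pre r s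
    have hin := pvInnerA_eq r [] nb mask num lastNum
    simp only [List.length_nil, List.nil_append] at hin
    have hset := set_append_len pre r (mutRow r nb mask num lastNum).1 s
    have hrec := ih (pre ++ [(mutRow r nb mask num lastNum).1])
      (mutRow r nb mask num lastNum).2
    simp only [List.length_append, List.length_cons, List.length_nil] at hrec
    simp only [List.length_cons]
    rw [List.range'_succ]
    simp only [pvOuterA, List.range_eq_range', hget, hin, hset, mutRows]
    simpa [List.append_assoc] using hrec

-- characterization of A
theorem calcular_host_eq (ip : List (List Int)) (mask num : Int) :
    calcular_host ip mask num =
      ((mutRows ((ip.reverse).map List.reverse) 32 mask num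
          (if num = 0 then 1 else 0)).1.reverse).map List.reverse := by
  have h1 : ∀ (l : List (List Int)),
      l.foldl (fun acc x => acc ++ [x.reverse]) [] = l.map List.reverse := by
    intro l
    simpa using foldl_append_map List.reverse l []
  have hlen : ip.length = ((ip.reverse).map List.reverse).length := by simp
  have houter := pvOuterA_eq ((ip.reverse).map List.reverse) [] 32 mask num
      (if num = 0 then 1 else 0)
  simp only [List.length_nil, List.nil_append] at houter
  simp only [calcular_host, reverse_list_eq, h1, List.range_eq_range', hlen, houter]

-- B's while loop, characterized through mutRow on the reversed prefix
theorem pvBGo_eq (mask num lastNum : Int) (n : Nat) :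
    ∀ (k : Nat) (out : List Int), out.length = n → k ≤ n →
    pvBGo out n k mask num lastNum =
      ((mutRow ((out.take (n - k)).reverse) (32 - (k : Int)) mask num lastNum).1).reverse
        ++ out.drop (n - k) := by
  intro k
  induction hd : n - k generalizing k with
  | zero =>
    intro out hlen hk
    have hkn : k = n := by omega
    subst hkn
    rw [pvBGo]
    simp [mutRow]
  | succ d ih =>
    intro out hlen hk
    have hklt : k < n := by omega
    have he : n - 1 - k = d := by omega
    have hdlt : d < out.length := by omega
    rw [pvBGo]
    by_cases hm : (32 - (k : Int)) = mask
    · rw [if_neg (by simp [hm])]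
      rw [← hm, mutRow_stop]
      simp
    · rw [if_pos (⟨hklt, hm⟩ : k < n ∧ (32 - (k : Int)) ≠ mask)]
      set v : Int := if k = 0 then lastNum else num with hv
      have hrec := ih (k + 1) (by omega) (out.set (n - 1 - k) v) (by simp [hlen]) (by omega)
      rw [he] at hrec
      rw [he]
      have htake : (out.set d v).take d = out.take d := by
        apply List.ext_getElem
        · simp
        · intro i h1 h2
          have hi : i < d := by simp only [List.length_take, List.length_set] at h1; omega
          simp only [List.getElem_take]
          rw [List.getElem_set_ne (by omega)]
      have hdrop2 : (out.set d v).drop (d + 1) = out.drop (d + 1) := by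
        apply List.ext_getElem
        · simp
        · intro i h1 h2
          simp only [List.getElem_drop]
          rw [List.getElem_set_ne (by omega)]
      have hdrop : (out.set d v).drop d = v :: out.drop (d + 1) := by
        rw [List.drop_eq_getElem_cons (by simp; omega)]
        rw [hdrop2]
        congr 1
        exact List.getElem_set_self (by simp; omega)
      have hsplit : out.take (d + 1) = out.take d ++ [out[d]] := by
        rw [List.take_add_one]
        simp [List.getElem?_eq_getElem hdlt]
      have hnb1 : (32 : Int) - ((k + 1 : Nat) : Int) = (32 - (k : Int)) - 1 := by
        push_cast; ring
      rw [hrec, htake, hdrop, hsplit, hnb1]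
      have hrev : (out.take d ++ [out[d]]).reverse =
          out[d] :: (out.take d).reverse := by simp
      rw [hrev]
      have hvv : (if (32 : Int) - (k : Int) = 32 then lastNum else num) = v := by
        rw [hv]
        by_cases h0 : k = 0
        · simp [h0]
        · have : ¬ ((32 : Int) - (k : Int) = 32) := by
            simp only [sub_eq_self]
            exact_mod_cast fun h => h0 (by exact_mod_cast h)
          simp [h0, this]
      simp only [mutRow, hm, if_false, hvv]
      simp [List.append_assoc]

-- pvChunk inverts flatten when the lengths match
theorem pvChunk_flatten (Y : List (List Int)) :
    pvChunk (Y.map List.length) Y.flatten = Y := by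
  induction Y with
  | nil => simp [pvChunk]
  | cons r rest ih =>
    simp [pvChunk, List.flatten, ih]

-- ===== VERDICT (by name: the statement is the Claim_ definition above) =====
theorem calcular_host_spec : Claim_equal_calcular_host := by
  intro ip mask num _
  unfold Spec_calcular_host
  set lastNum : Int := if num = 0 then 1 else 0 with hln
  set rip : List (List Int) := (ip.reverse).map List.reverse with hrip
  set M : List (List Int) := (mutRows rip 32 mask num lastNum).1 with hM
  set Y : List (List Int) := (M.reverse).map List.reverse with hY
  have hA : calcular_host ip mask num = Y := calcular_host_eq ip mask num
  -- flatten of rip is the reverse of ip's flatten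
  have hripflat : rip.flatten = ip.flatten.reverse := by
    rw [hrip, List.map_reverse, ← List.reverse_flatten]
  -- Y's row lengths are ip's row lengths
  have hYlen : Y.map List.length = ip.map List.length := by
    rw [hY, hM]
    simp [List.map_map, Function.comp_def, List.map_reverse, mutRows_lengths, hrip]
  -- Y's flatten is B's mutated flat list
  have hYflat : Y.flatten = (mutRow (ip.flatten.reverse) 32 mask num lastNum).1.reverse := by
    rw [hY, List.map_reverse, ← List.reverse_flatten, hM,
      (mutRows_flatten rip 32 mask num lastNum).1, hripflat]
  have hB : calcular_host_alt ip mask num = Y := by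
    show pvChunk (ip.map List.length) (pvBGo (ip.flatMap id) (ip.flatMap id).length 0
        mask num lastNum) = Y
    have hfm : ip.flatMap id = ip.flatten := by simp [List.flatMap_id]
    have hbgo := pvBGo_eq mask num lastNum (ip.flatten.length) 0 ip.flatten rfl
      (Nat.zero_le _)
    simp only [Nat.sub_zero, List.take_length, List.drop_length, List.append_nil,
      Nat.cast_zero, sub_zero] at hbgo
    rw [hfm, hbgo, ← hYflat, ← hYlen, pvChunk_flatten]
  rw [hA, hB]
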